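-- pv_equiv track=rewrite | github.com/Cristian-Infante/AUTOMATA_APP | AUTOMATA_APP/language_description.py | tokenize_regex
-- ===== SOURCE A (Python) =====
-- def tokenize_regex(s):
--     """
--     Tokeniza la expresión regular en una lista de tokens.
--
--     Args:
--         s (str): Expresión regular.
--
--     Returns:
--         list: Lista de tokens.
--     """
--     tokens = []
--     i = 0
--     while i < len(s):
--         c = s[i]
--         if c in '()*+?|':
--             tokens.append(c)
--             i += 1
--         elif c.isalnum():
--             tokens.append(c)
--             i += 1
--         elif c == '\\':
--             # Secuencia de escape
--             if i + 1 < len(s):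
--                 tokens.append(s[i + 1])
--                 i += 2
--             else:
--                 raise ValueError("Secuencia de escape inválida al final de la expresión regular")
--         else:
--             i += 1  # Ignorar otros caracteres (p. ej., espacios)
--     return tokens
-- ===== SOURCE B (Python) =====
-- def tokenize_regex(s):
--     """Staged tokenizer: split on backslashes, then walk the pieces; each piece
--     boundary is an escape whose escaped char is emitted verbatim."""
--     def norm(t):
--         return [c for c in t if c in '()*+?|' or c.isalnum()]
--     pieces = s.split('\\')
--     tokens = norm(pieces[0])
--     i = 1
--     while i < len(pieces):
--         p = pieces[i]
--         if p:
--             # the separator before p escapes p[0]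
--             tokens.append(p[0])
--             tokens.extend(norm(p[1:]))
--             i += 1
--         else:
--             if i == len(pieces) - 1:
--                 raise ValueError("Secuencia de escape inválida al final de la expresión regular")
--             # escaped backslash: the next separator is the escaped char
--             tokens.append('\\')
--             tokens.extend(norm(pieces[i + 1]))
--             i += 2
--     return tokens
-- ===== Notes on version B (the rewrite author's own statement) =====
-- stated objective: alternative
-- what changed: Replaced the char-by-char index scan (i+=1/i+=2 with a bounds check per escape) by a staged algorithm: split the string on backslashes once, filter each piece with a comprehension, and emit the escaped character at each piece boundary (an empty piece means an escaped backslash, an empty last piece means the trailing-escape ValueError).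
import Mathlib
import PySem

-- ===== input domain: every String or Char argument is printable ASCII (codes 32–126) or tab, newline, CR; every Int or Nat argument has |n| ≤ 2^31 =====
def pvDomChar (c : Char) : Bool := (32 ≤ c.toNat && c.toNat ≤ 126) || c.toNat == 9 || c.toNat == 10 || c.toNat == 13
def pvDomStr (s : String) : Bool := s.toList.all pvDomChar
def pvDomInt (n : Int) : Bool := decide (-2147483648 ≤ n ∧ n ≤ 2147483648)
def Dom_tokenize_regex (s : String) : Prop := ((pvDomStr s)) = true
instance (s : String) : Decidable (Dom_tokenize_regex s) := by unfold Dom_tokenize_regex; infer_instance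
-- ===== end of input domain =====

-- B replaces A's char-by-char index scan by a staged algorithm: split the string on
-- backslashes, filter each piece, and emit the escaped character at each piece boundary.

-- ===== PORT A =====
-- index-driven while loop: i advances by 1 (or 2 on an escape); tokens accumulated by append
def tokenizeLoopA (cs : List Char) (i : Nat) (tokens : List String) : List String :=
  if h : i < cs.length then
    let c := cs[i]
    if "()*+?|".toList.contains c then
      tokenizeLoopA cs (i + 1) (tokens ++ [c.toString])
    else if PySem.Chars.isalnum c then
      tokenizeLoopA cs (i + 1) (tokens ++ [c.toString])
    else if c = '\\' then
      if h2 : i + 1 < cs.length then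
        tokenizeLoopA cs (i + 2) (tokens ++ [(cs[i + 1]).toString])
      else
        tokens  -- Python raises ValueError here; excluded by Pre_tokenize_regex
    else
      tokenizeLoopA cs (i + 1) tokens
  else
    tokens
termination_by cs.length - i

def tokenize_regex (s : String) : List String :=
  tokenizeLoopA s.toList 0 []

-- ===== PORT B =====
-- norm(t): the kept characters of a piece (no backslash can occur inside a piece)
def normB (t : List Char) : List String :=
  (t.filter (fun c => "()*+?|".toList.contains c || PySem.Chars.isalnum c)).map (fun c => c.toString)

-- the while loop over pieces[1:]: i advances by 1 piece (nonempty piece) or 2 (escaped backslash)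
def walkB : List (List Char) → List String
  | [] => []
  | p :: rest =>
    match p with
    | c :: tl => c.toString :: (normB tl ++ walkB rest)   -- separator escapes p[0]
    | [] =>
      match rest with
      | [] => []                                          -- Python raises ValueError; excluded by Pre_tokenize_regex
      | q :: rest' => "\\" :: (normB q ++ walkB rest')  -- escaped backslash

def tokenize_regex_alt (s : String) : List String :=
  match PySem.Chars.splitOn s.toList "\\".toList with
  | [] => []                      -- unreachable: split never returns an empty list
  | p0 :: rest => normB p0 ++ walkB rest

-- ===== PRECONDITION & SPEC =====
-- Pre_ excludes exactly the strings on which A raises ValueError (and B raises the same):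
-- those whose trailing run of backslashes has odd length, so the scan meets a '\' at the last position.
def Pre_tokenize_regex (s : String) : Prop :=
  ((s.toList.reverse.takeWhile (· = '\\')).length) % 2 = 0
instance (s : String) : Decidable (Pre_tokenize_regex s) := by unfold Pre_tokenize_regex; infer_instance

def pvWitness_tokenize_regex : String := "(a\\+b)*"

def Spec_tokenize_regex (s : String) (out : List String) : Prop := out = tokenize_regex_alt s
instance (s : String) (out : List String) : Decidable (Spec_tokenize_regex s out) := by unfold Spec_tokenize_regex; infer_instance

-- ===== CLAIM (what is proved, stated in full; the proofs are below) =====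
def Claim_equal_tokenize_regex : Prop := ∀ (s : String), Dom_tokenize_regex s → Pre_tokenize_regex s → Spec_tokenize_regex s (tokenize_regex s)

-- ===== LEMMAS AND PROOFS =====

-- canonical recursive tokenization (proof device relating the two ports)
def tokT : List Char → List String
  | [] => []
  | c :: it =>
    if "()*+?|".toList.contains c || PySem.Chars.isalnum c then
      c.toString :: tokT it
    else if c = '\\' then
      match it with
      | d :: it' => d.toString :: tokT it'
      | [] => []
    else
      tokT it

-- structural single-character splitter (proof device equal to PySem.Chars.splitOn · ['\\'])
def split1 : List Char → List (List Char)
  | [] => [[]]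
  | c :: r =>
    if c = '\\' then [] :: split1 r
    else
      match split1 r with
      | [] => []            -- unreachable
      | h :: t => (c :: h) :: t

lemma split1_ne_nil (cs : List Char) : split1 cs ≠ [] := by
  induction cs with
  | nil => simp [split1]
  | cons c r ih =>
    simp only [split1]
    split_ifs
    · simp
    · cases h : split1 r with
      | nil => exact absurd h ih
      | cons h t => simp

-- PySem's fuel-based splitOn specialised to the one-char separator equals split1
lemma splitOn_go_spec : ∀ (fuel : Nat) (l cur : List Char) (acc : List (List Char)),
    l.length < fuel →
    PySem.Chars.splitOn.go ['\\'] fuel l cur acc =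
      acc.reverse ++ (match split1 l with
                      | [] => []
                      | h :: t => (cur.reverse ++ h) :: t) := by
  intro fuel
  induction fuel with
  | zero => intro l cur acc h; omega
  | succ n ih =>
    intro l cur acc h
    cases l with
    | nil => simp [PySem.Chars.splitOn.go, split1]
    | cons c rest =>
      simp only [PySem.Chars.splitOn.go]
      by_cases hc : c = '\\'
      · have hpre : List.isPrefixOf ['\\'] (c :: rest) = true := by
          simp [List.isPrefixOf, hc]
        rw [if_pos hpre]
        have hdrop : List.drop (['\\'].length) (c :: rest) = rest := rfl
        rw [hdrop]
        simp only [List.length_cons] at h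
        rw [ih rest [] (cur.reverse :: acc) (by omega)]
        simp only [split1, if_pos hc]
        cases hs : split1 rest with
        | nil => exact absurd hs (split1_ne_nil rest)
        | cons hh tt => simp
      · have hpre : List.isPrefixOf ['\\'] (c :: rest) = false := by
          simp [List.isPrefixOf]
          exact fun hcc => absurd hcc.symm hc
        rw [if_neg (by simp [hpre])]
        simp only [List.length_cons] at h
        rw [ih rest (c :: cur) acc (by omega)]
        simp only [split1, if_neg hc]
        cases hs : split1 rest with
        | nil => exact absurd hs (split1_ne_nil rest)
        | cons hh tt => simp

lemma splitOn_eq_split1 (cs : List Char) :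
    PySem.Chars.splitOn cs "\\".toList = split1 cs := by
  have : "\\".toList = ['\\'] := by decide
  rw [this]
  show PySem.Chars.splitOn.go ['\\'] (cs.length + 1) cs [] [] = split1 cs
  rw [splitOn_go_spec (cs.length + 1) cs [] [] (by omega)]
  cases hs : split1 cs with
  | nil => exact absurd hs (split1_ne_nil cs)
  | cons h t => simp

-- normB of a cons splits off the head's contribution
lemma normB_cons (c : Char) (t : List Char) :
    normB (c :: t) =
      (if "()*+?|".toList.contains c || PySem.Chars.isalnum c then [c.toString] else []) ++ normB t := by
  simp only [normB, List.filter_cons]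
  split_ifs with h
  · simp
  · simp

-- equation lemmas for tokT and walkB (definitional)
lemma tokT_cons (c : Char) (r : List Char) :
    tokT (c :: r) =
      if "()*+?|".toList.contains c || PySem.Chars.isalnum c then c.toString :: tokT r
      else if c = '\\' then (match r with | d :: it' => d.toString :: tokT it' | [] => [])
      else tokT r := by rw [tokT.eq_def]

-- B's piece walk over split1 computes the canonical tokenization
lemma walk_split1_eq_tokT : ∀ (n : Nat) (cs : List Char), cs.length ≤ n →
    ∀ p0 rest, split1 cs = p0 :: rest → normB p0 ++ walkB rest = tokT cs := by
  intro n
  induction n with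
  | zero =>
    intro cs h p0 rest hs
    have : cs = [] := List.eq_nil_of_length_eq_zero (by omega)
    subst this
    simp only [split1, List.cons.injEq] at hs
    obtain ⟨rfl, rfl⟩ := hs
    simp [normB, walkB, tokT]
  | succ n ih =>
    intro cs h p0 rest hs
    cases cs with
    | nil =>
      simp only [split1, List.cons.injEq] at hs
      obtain ⟨rfl, rfl⟩ := hs
      simp [normB, walkB, tokT]
    | cons c r =>
      simp only [List.length_cons] at h
      have hnormnil : normB [] = [] := rfl
      by_cases hc : c = '\\'
      · subst hc
        simp only [split1] at hs
        obtain ⟨rfl, rfl⟩ := hs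
        have hkeep : ("()*+?|".toList.contains '\\' || PySem.Chars.isalnum '\\') = false := by decide
        rw [hnormnil, List.nil_append]
        cases r with
        | nil => decide
        | cons d r' =>
          have htok : tokT ('\\' :: d :: r') = d.toString :: tokT r' := by
            rw [tokT_cons]
            have h2 : PySem.Chars.isalnum '\\' = false := by decide
            simp [h2]
          rw [htok]
          simp only [List.length_cons] at h
          cases hq : split1 r' with
          | nil => exact absurd hq (split1_ne_nil r')
          | cons q rest' =>
            have hIH := ih r' (by omega) q rest' hq
            by_cases hd : d = '\\'
            · subst hd
              have hsplit : split1 ('\\' :: r') = [] :: q :: rest' := by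
                rw [split1.eq_def]; simp [hq]
              rw [hsplit]
              show "\\" :: (normB q ++ walkB rest') = Char.toString '\\' :: tokT r'
              rw [hIH]
              rfl
            · have hsplit : split1 (d :: r') = (d :: q) :: rest' := by
                rw [split1.eq_def]; simp [hd, hq]
              rw [hsplit]
              show d.toString :: (normB q ++ walkB rest') = d.toString :: tokT r'
              rw [hIH]
      · rw [split1.eq_def] at hs
        simp only [if_neg hc] at hs
        cases hq : split1 r with
        | nil => exact absurd hq (split1_ne_nil r)
        | cons q rest1 =>
          rw [hq] at hs
          simp only [List.cons.injEq] at hs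
          obtain ⟨rfl, rfl⟩ := hs
          have hIH := ih r (by omega) q rest1 hq
          rw [normB_cons, tokT_cons]
          by_cases hk : ("()*+?|".toList.contains c || PySem.Chars.isalnum c) = true
          · rw [if_pos hk, if_pos hk, List.singleton_append, List.cons_append, hIH]
          · rw [if_neg hk, if_neg hk, if_neg hc, List.nil_append, hIH]

lemma alt_eq_tokT (s : String) : tokenize_regex_alt s = tokT s.toList := by
  unfold tokenize_regex_alt
  rw [splitOn_eq_split1]
  cases hs : split1 s.toList with
  | nil => exact absurd hs (split1_ne_nil s.toList)
  | cons p0 rest =>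
    exact walk_split1_eq_tokT s.toList.length s.toList (le_refl _) p0 rest hs

-- A's loop from position i equals acc ++ the canonical tokenization of the remaining characters
-- (in A's ValueError case A's port returns acc and tokT returns [], so this holds for every input).
lemma loopA_eq_tokT : ∀ (n : Nat) (cs : List Char) (i : Nat) (acc : List String),
    cs.length - i ≤ n → tokenizeLoopA cs i acc = acc ++ tokT (cs.drop i) := by
  intro n
  induction n with
  | zero =>
    intro cs i acc h
    have hi : ¬ i < cs.length := by omega
    rw [tokenizeLoopA]
    simp [hi, List.drop_eq_nil_of_le (by omega : cs.length ≤ i), tokT]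
  | succ n ih =>
    intro cs i acc h
    rw [tokenizeLoopA]
    by_cases hi : i < cs.length
    · rw [List.drop_eq_getElem_cons hi, tokT.eq_def]
      simp only [hi, dite_true]
      by_cases h1 : "()*+?|".toList.contains cs[i]
      · simp only [h1, Bool.true_or, if_pos]
        simp [ih cs (i + 1) _ (by omega)]
      · by_cases h2 : PySem.Chars.isalnum cs[i]
        · simp only [h1, h2, Bool.false_or, if_true]
          simp [ih cs (i + 1) _ (by omega)]
        · by_cases h3 : cs[i] = '\\'
          · have hb2 : PySem.Chars.isalnum '\\' = false := by decide
            simp only [h3, hb2, if_true]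
            by_cases h4 : i + 1 < cs.length
            · rw [List.drop_eq_getElem_cons h4]
              simp [h4, ih cs (i + 2) _ (by omega), Nat.add_assoc]
            · have hnil : cs.drop (i + 1) = [] := List.drop_eq_nil_of_le (by omega)
              simp [h4, hnil]
          · simp only [h1, h2, h3, Bool.false_or, if_false]
            simp [ih cs (i + 1) _ (by omega)]
    · simp [hi, List.drop_eq_nil_of_le (by omega : cs.length ≤ i), tokT]

-- ===== VERDICT (by name: the statement is the Claim_ definition above) =====
theorem tokenize_regex_spec : Claim_equal_tokenize_regex := by
  intro s _ _
  unfold Spec_tokenize_regex tokenize_regex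
  rw [alt_eq_tokT]
  simpa using loopA_eq_tokT s.toList.length s.toList 0 []
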